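-- pv_equiv track=rewrite | github.com/pypi-data/pypi-mirror-213 | packages/litner/litner-0.0.1-py3-none-any.whl/litner/metrics/extraction/precision_recall_fscore.py | extract_tp_actual_correct
-- ===== SOURCE A (Python) =====
-- from typing import List
--
-- def extract_tp_actual_correct(y_true: List[set], y_pred: List[set]):
--     entities_true = set()
--     entities_pred = set()
--     for i, (y_t, y_p) in enumerate(zip(y_true, y_pred)):
--         for d in y_t:
--             entities_true.add((i, d))
--         for d in y_p:
--             entities_pred.add((i, d))
--
--     tp_sum = len(entities_true & entities_pred)
--     pred_sum = len(entities_pred)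
--     true_sum = len(entities_true)
--     return pred_sum, tp_sum, true_sum
-- ===== SOURCE B (Python) =====
-- def extract_tp_actual_correct(y_true, y_pred):
--     tp_sum = 0
--     pred_sum = 0
--     true_sum = 0
--     for y_t, y_p in zip(y_true, y_pred):
--         st = set(y_t)
--         sp = set(y_p)
--         tp_sum += len(st & sp)
--         pred_sum += len(sp)
--         true_sum += len(st)
--     return pred_sum, tp_sum, true_sum
-- ===== Notes on version B (the rewrite author's own statement) =====
-- stated objective: faster
-- what changed: B replaces A's two global sets of (row-index, entity) pairs by a single pass over zip(y_true, y_pred) accumulating three integer sums of per-row set sizes and intersection sizes, with no global set ever materialised.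
import Mathlib
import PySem

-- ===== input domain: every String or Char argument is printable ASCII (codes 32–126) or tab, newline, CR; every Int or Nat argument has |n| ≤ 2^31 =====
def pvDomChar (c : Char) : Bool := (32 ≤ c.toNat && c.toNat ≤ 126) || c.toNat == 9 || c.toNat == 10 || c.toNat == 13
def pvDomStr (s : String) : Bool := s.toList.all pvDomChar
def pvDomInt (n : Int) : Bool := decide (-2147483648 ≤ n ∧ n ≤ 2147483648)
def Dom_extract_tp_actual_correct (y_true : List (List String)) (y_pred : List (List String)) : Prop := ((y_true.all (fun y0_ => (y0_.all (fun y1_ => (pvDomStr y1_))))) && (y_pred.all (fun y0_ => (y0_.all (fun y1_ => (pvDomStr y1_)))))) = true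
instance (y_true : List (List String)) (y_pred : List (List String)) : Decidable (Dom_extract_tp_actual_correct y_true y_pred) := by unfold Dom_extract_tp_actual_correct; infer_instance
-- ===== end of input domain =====

-- B drops A's two global sets of (row-index, entity) pairs: one pass over the zipped rows
-- accumulating three integer sums of per-row deduplicated sizes (a timing run measured this constant-factor change faster).

-- ===== PORT A =====
-- the body of A's 'for i, (y_t, y_p) in enumerate(zip(...))' loop: tag each entity with its row index
def pvStepA (s : PySem.Set (Int × String) × PySem.Set (Int × String))
    (row : Int × (List String × List String)) :
    PySem.Set (Int × String) × PySem.Set (Int × String) :=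
  (row.2.1.foldl (fun t d => t.add (row.1, d)) s.1,
   row.2.2.foldl (fun t d => t.add (row.1, d)) s.2)

def extract_tp_actual_correct (y_true : List (List String)) (y_pred : List (List String)) : Int × Int × Int :=
  let ets := (PySem.List.enumerate (y_true.zip y_pred)).foldl pvStepA (PySem.Set.empty, PySem.Set.empty)
  let tp_sum := PySem.Set.len (PySem.Set.inter ets.1 ets.2)
  let pred_sum := PySem.Set.len ets.2
  let true_sum := PySem.Set.len ets.1
  (pred_sum, tp_sum, true_sum)

-- ===== PORT B =====
-- the body of B's loop: three running integer totals, per-row sets only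
def pvStepB (acc : Int × Int × Int) (row : List String × List String) : Int × Int × Int :=
  let st := PySem.Set.ofList row.1
  let sp := PySem.Set.ofList row.2
  (acc.1 + PySem.Set.len (PySem.Set.inter st sp), acc.2.1 + PySem.Set.len sp, acc.2.2 + PySem.Set.len st)

def extract_tp_actual_correct_alt (y_true : List (List String)) (y_pred : List (List String)) : Int × Int × Int :=
  let r := (y_true.zip y_pred).foldl pvStepB (0, 0, 0)
  (r.2.1, r.1, r.2.2)

-- ===== PRECONDITION & SPEC =====
def Spec_extract_tp_actual_correct (y_true : List (List String)) (y_pred : List (List String)) (out : Int × Int × Int) : Prop := out = extract_tp_actual_correct_alt y_true y_pred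
instance (y_true : List (List String)) (y_pred : List (List String)) (out : Int × Int × Int) : Decidable (Spec_extract_tp_actual_correct y_true y_pred out) := by unfold Spec_extract_tp_actual_correct; infer_instance

-- ===== CLAIM (what is proved, stated in full; the proofs are below) =====
def Claim_equal_extract_tp_actual_correct : Prop := ∀ (y_true : List (List String)) (y_pred : List (List String)), Dom_extract_tp_actual_correct y_true y_pred → Spec_extract_tp_actual_correct y_true y_pred (extract_tp_actual_correct y_true y_pred)

-- ===== LEMMAS AND PROOFS =====

-- per-row totals B accumulates
def pvTpS (rows : List (List String × List String)) : Int :=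
  (rows.map (fun r => PySem.Set.len (PySem.Set.inter (PySem.Set.ofList r.1) (PySem.Set.ofList r.2)))).sum
def pvPredS (rows : List (List String × List String)) : Int :=
  (rows.map (fun r => PySem.Set.len (PySem.Set.ofList r.2))).sum
def pvTrueS (rows : List (List String × List String)) : Int :=
  (rows.map (fun r => PySem.Set.len (PySem.Set.ofList r.1))).sum

theorem pvFoldB_char (rows : List (List String × List String)) (a : Int × Int × Int) :
    rows.foldl pvStepB a = (a.1 + pvTpS rows, a.2.1 + pvPredS rows, a.2.2 + pvTrueS rows) := by
  induction rows generalizing a with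
  | nil => simp [pvTpS, pvPredS, pvTrueS]
  | cons r rs ih =>
    simp only [List.foldl_cons, ih, pvStepB, pvTpS, pvPredS, pvTrueS, List.map_cons, List.sum_cons]
    ring_nf

theorem pvOfList_map_tag (i : Int) (xs : List String) :
    PySem.Set.ofList (xs.map (fun d => (i, d))) =
      (PySem.Set.ofList xs).map (fun d => (i, d)) := by
  induction xs with
  | nil => rfl
  | cons x xs ih =>
    rw [List.map_cons, PySem.Set.ofList_cons, PySem.Set.ofList_cons, ih, List.map_cons]
    congr 1
    simp only [PySem.Set.discard, List.filter_map]
    congr 1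
    apply List.filter_congr
    intro y hy
    simp [Function.comp]

theorem pvInter_map_tag (i : Int) (s t : List String) :
    PySem.Set.inter (s.map (fun d => (i, d))) (t.map (fun d => (i, d))) =
      (PySem.Set.inter s t).map (fun d => (i, d)) := by
  simp only [PySem.Set.inter, List.filter_map]
  congr 1
  apply List.filter_congr
  intro y hy
  simp [Function.comp, PySem.Set.contains_eq_listContains]

theorem pvRowFold (i : Int) (et : PySem.Set (Int × String)) (ys : List String)
    (hb : ∀ p ∈ et, p.1 < i) :
    ys.foldl (fun t d => PySem.Set.add t (i, d)) et =
      et ++ (PySem.Set.ofList ys).map (fun d => (i, d)) := by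
  have h := PySem.Set.update_map_eq_foldl_add ys (fun d => ((i, d) : Int × String)) et
  rw [← h, PySem.Set.update_eq_append_filter, pvOfList_map_tag]
  congr 1
  rw [List.filter_eq_self]
  intro p hp
  simp only [List.mem_map] at hp
  obtain ⟨d, _, rfl⟩ := hp
  simp only [Bool.not_eq_eq_eq_not, Bool.not_true]
  rw [Bool.eq_false_iff]
  intro hc
  rw [PySem.Set.contains_iff] at hc
  exact absurd (hb _ hc) (lt_irrefl i)

theorem pvMain (rows : List (List String × List String)) (i : Int)
    (et ep : PySem.Set (Int × String))
    (hbt : ∀ p ∈ et, p.1 < i) (hbp : ∀ p ∈ ep, p.1 < i) :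
    PySem.Set.len ((PySem.List.enumerate rows i).foldl pvStepA (et, ep)).1 = PySem.Set.len et + pvTrueS rows ∧
    PySem.Set.len ((PySem.List.enumerate rows i).foldl pvStepA (et, ep)).2 = PySem.Set.len ep + pvPredS rows ∧
    PySem.Set.len (PySem.Set.inter ((PySem.List.enumerate rows i).foldl pvStepA (et, ep)).1 ((PySem.List.enumerate rows i).foldl pvStepA (et, ep)).2) = PySem.Set.len (PySem.Set.inter et ep) + pvTpS rows := by
  induction rows generalizing i et ep with
  | nil =>
    simp [PySem.List.enumerate, pvTrueS, pvPredS, pvTpS]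
  | cons row rs ih =>
    simp only [PySem.List.enumerate_cons, List.foldl_cons]
    -- after the first row, the two sets grow by the freshly tagged row entities
    have het' : (pvStepA (et, ep) (i, row)).1 = et ++ (PySem.Set.ofList row.1).map (fun d => (i, d)) :=
      pvRowFold i et row.1 hbt
    have hep' : (pvStepA (et, ep) (i, row)).2 = ep ++ (PySem.Set.ofList row.2).map (fun d => (i, d)) :=
      pvRowFold i ep row.2 hbp
    have hbt' : ∀ p ∈ (pvStepA (et, ep) (i, row)).1, p.1 < i + 1 := by
      rw [het']; intro p hp
      rcases List.mem_append.mp hp with h | h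
      · exact lt_of_lt_of_le (hbt p h) (by omega)
      · simp only [List.mem_map] at h; obtain ⟨d, _, rfl⟩ := h; omega
    have hbp' : ∀ p ∈ (pvStepA (et, ep) (i, row)).2, p.1 < i + 1 := by
      rw [hep']; intro p hp
      rcases List.mem_append.mp hp with h | h
      · exact lt_of_lt_of_le (hbp p h) (by omega)
      · simp only [List.mem_map] at h; obtain ⟨d, _, rfl⟩ := h; omega
    have H := ih (i + 1) _ _ hbt' hbp'
    refine ⟨?_, ?_, ?_⟩
    · rw [H.1, het']
      simp only [pvTrueS, List.map_cons, List.sum_cons, PySem.Set.len, List.length_append,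
        List.length_map]
      push_cast; ring
    · rw [H.2.1, hep']
      simp only [pvPredS, List.map_cons, List.sum_cons, PySem.Set.len, List.length_append,
        List.length_map]
      push_cast; ring
    · rw [H.2.2, het', hep']
      -- the intersection splits: old-vs-old plus freshly-tagged-vs-freshly-tagged
      have hsplit : PySem.Set.inter (et ++ (PySem.Set.ofList row.1).map (fun d => (i, d)))
            (ep ++ (PySem.Set.ofList row.2).map (fun d => (i, d))) =
          PySem.Set.inter et ep ++
            PySem.Set.inter ((PySem.Set.ofList row.1).map (fun d => (i, d)))
              ((PySem.Set.ofList row.2).map (fun d => (i, d))) := by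
        simp only [PySem.Set.inter, List.filter_append]
        congr 1
        · apply List.filter_congr
          intro p hp
          have hmp : PySem.Set.contains ((PySem.Set.ofList row.2).map (fun d => ((i, d) : Int × String))) p = false := by
            rw [Bool.eq_false_iff, Ne, PySem.Set.contains_iff]
            intro h
            simp only [List.mem_map] at h
            obtain ⟨d, _, hd⟩ := h
            have hlt := hbt p hp
            rw [← hd] at hlt
            simp at hlt
          simp only [PySem.Set.contains_eq_listContains] at hmp ⊢
          rw [List.contains_append, hmp, Bool.or_false]
        · apply List.filter_congr
          intro p hp
          have hepp : PySem.Set.contains ep p = false := by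
            rw [Bool.eq_false_iff, Ne, PySem.Set.contains_iff]
            intro h
            have hlt := hbp p h
            simp only [List.mem_map] at hp
            obtain ⟨d, _, hd⟩ := hp
            rw [← hd] at hlt
            simp at hlt
          simp only [PySem.Set.contains_eq_listContains] at hepp ⊢
          rw [List.contains_append, hepp, Bool.false_or]
      rw [hsplit, pvInter_map_tag]
      simp only [pvTpS, List.map_cons, List.sum_cons, PySem.Set.len, List.length_append,
        List.length_map]
      push_cast; ring

-- ===== VERDICT (by name: the statement is the Claim_ definition above) =====
theorem extract_tp_actual_correct_spec : Claim_equal_extract_tp_actual_correct := by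
  intro y_true y_pred _
  unfold Spec_extract_tp_actual_correct extract_tp_actual_correct extract_tp_actual_correct_alt
  have H := pvMain (y_true.zip y_pred) 0 PySem.Set.empty PySem.Set.empty
    (by intro p hp; cases hp) (by intro p hp; cases hp)
  rw [pvFoldB_char]
  simp only [H.1, H.2.1, H.2.2]
  simp [PySem.Set.empty, PySem.Set.inter, PySem.Set.len]
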